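-- pv_equiv track=rewrite | github.com/KudouZala/ion_detect | data/scripts/eis_code/bode_plot.py | find_data_starting_indices
-- ===== SOURCE A (Python) =====
-- def find_data_starting_indices(lines, keywords):
--     indices = {key: None for key in keywords}
--     for i, line in enumerate(lines):
--         columns = line.strip().split('\t')
--         for j, column in enumerate(columns):
--             if column in indices:
--                 indices[column] = (i, j)
--     return indices
-- ===== SOURCE B (Python) =====
-- def find_data_starting_indices(lines, keywords):
--     result = {key: None for key in keywords}
--     remaining = set(result)
--     for i, line in reversed(list(enumerate(lines))):
--         if not remaining:
--             break
--         for j, column in reversed(list(enumerate(line.strip().split('\t')))):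
--             if column in remaining:
--                 result[column] = (i, j)
--                 remaining.discard(column)
--     return result
-- ===== Notes on version B (the rewrite author's own statement) =====
-- stated objective: alternative
-- what changed: A scans lines left-to-right top-to-bottom overwriting each keyword's entry on every hit; B scans backwards (last line first, columns right-to-left) keeping a shrinking set of still-unfound keywords, records only the first hit per keyword, and breaks out of the outer loop as soon as the set is empty.
import Mathlib
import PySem

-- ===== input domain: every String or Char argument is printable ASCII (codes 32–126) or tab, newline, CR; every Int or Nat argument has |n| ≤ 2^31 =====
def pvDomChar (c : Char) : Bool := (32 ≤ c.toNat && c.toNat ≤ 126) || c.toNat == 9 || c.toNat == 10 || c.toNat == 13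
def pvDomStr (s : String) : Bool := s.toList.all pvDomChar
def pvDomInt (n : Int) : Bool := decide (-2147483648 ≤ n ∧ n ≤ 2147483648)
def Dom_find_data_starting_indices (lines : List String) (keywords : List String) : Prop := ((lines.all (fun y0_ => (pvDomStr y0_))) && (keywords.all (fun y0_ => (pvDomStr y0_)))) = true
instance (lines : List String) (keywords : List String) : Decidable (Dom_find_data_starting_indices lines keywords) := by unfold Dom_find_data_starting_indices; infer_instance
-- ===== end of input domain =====

-- B replaces A's forward overwrite-every-hit scan by a backward scan that keeps a shrinking
-- set of still-unfound keywords and breaks out as soon as it is empty (objective: alternative).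

-- ===== PORT A =====
-- line.strip().split('\t'): split? is always `some` because the separator "\t" is nonempty
def find_data_starting_indices (lines : List String) (keywords : List String) : List (String × Option (Int × Int)) :=
  let indices : PySem.Dict String (Option (Int × Int)) :=
    keywords.foldl (fun d key => d.insert key none) PySem.Dict.empty
  let final :=
    (PySem.List.enumerate lines 0).foldl (fun d p =>
      let columns := (PySem.Str.split? (PySem.Str.strip p.2) "\t").getD []
      (PySem.List.enumerate columns 0).foldl (fun d q =>
        if d.contains q.2 then d.insert q.2 (some (p.1, q.1)) else d) d) indices
  final.items

-- ===== PORT B =====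
-- one step of B's inner loop: a cell (j, column) of line i, scanned right to left
def fds_step (i : Int) (st : PySem.Set String × PySem.Dict String (Option (Int × Int)))
    (q : Int × String) : PySem.Set String × PySem.Dict String (Option (Int × Int)) :=
  if PySem.Set.contains st.1 q.2 then
    (PySem.Set.discard st.1 q.2, st.2.insert q.2 (some (i, q.1)))
  else st

-- B's outer loop over the reversed enumerated lines, breaking when the set is empty
def fds_go : List (Int × String) → PySem.Set String × PySem.Dict String (Option (Int × Int)) →
    PySem.Dict String (Option (Int × Int))
  | [], st => st.2
  | (i, line) :: rest, st =>
    if st.1.isEmpty then st.2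
    else
      fds_go rest
        (((PySem.List.enumerate ((PySem.Str.split? (PySem.Str.strip line) "\t").getD []) 0).reverse).foldl
          (fds_step i) st)

def find_data_starting_indices_alt (lines : List String) (keywords : List String) : List (String × Option (Int × Int)) :=
  let result : PySem.Dict String (Option (Int × Int)) :=
    keywords.foldl (fun d key => d.insert key none) PySem.Dict.empty
  let remaining : PySem.Set String := PySem.Set.ofList result.keys
  (fds_go ((PySem.List.enumerate lines 0).reverse) (remaining, result)).items

-- ===== PRECONDITION & SPEC =====
def Spec_find_data_starting_indices (lines : List String) (keywords : List String) (out : List (String × Option (Int × Int))) : Prop := out = find_data_starting_indices_alt lines keywords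
instance (lines : List String) (keywords : List String) (out : List (String × Option (Int × Int))) : Decidable (Spec_find_data_starting_indices lines keywords out) := by unfold Spec_find_data_starting_indices; infer_instance

-- ===== CLAIM (what is proved, stated in full; the proofs are below) =====
def Claim_equal_find_data_starting_indices : Prop := ∀ (lines : List String) (keywords : List String), Dom_find_data_starting_indices lines keywords → Spec_find_data_starting_indices lines keywords (find_data_starting_indices lines keywords)

-- ===== LEMMAS AND PROOFS =====

-- the columns of one line, and the flattened cell stream (column, (row index, column index))
def pvCols (line : String) : List String :=
  (PySem.Str.split? (PySem.Str.strip line) "\t").getD []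

def pvCellsOf (p : Int × String) : List (String × (Int × Int)) :=
  (PySem.List.enumerate (pvCols p.2) 0).map (fun q => (q.2, (p.1, q.1)))

def pvCells (lines : List String) : List (String × (Int × Int)) :=
  (PySem.List.enumerate lines 0).flatMap pvCellsOf

-- A's per-cell step (overwrite on every hit) and B's per-cell step (first hit, shrink the set)
def pvStepA (d : PySem.Dict String (Option (Int × Int))) (x : String × (Int × Int)) :
    PySem.Dict String (Option (Int × Int)) :=
  if d.contains x.1 then d.insert x.1 (some x.2) else d

def pvStepB (st : PySem.Set String × PySem.Dict String (Option (Int × Int)))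
    (x : String × (Int × Int)) : PySem.Set String × PySem.Dict String (Option (Int × Int)) :=
  if PySem.Set.contains st.1 x.1 then
    (PySem.Set.discard st.1 x.1, st.2.insert x.1 (some x.2))
  else st

theorem pv_reverse_flatMap {α β : Type} (l : List α) (f : α → List β) :
    (l.flatMap f).reverse = l.reverse.flatMap (fun x => (f x).reverse) := by
  induction l with
  | nil => simp
  | cons x xs ih => simp [List.flatMap_cons, ih]

-- A's step does not change which keys are present
theorem pvStepA_contains (d : PySem.Dict String (Option (Int × Int)))
    (x : String × (Int × Int)) (k : String) : (pvStepA d x).contains k = d.contains k := by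
  unfold pvStepA
  split
  · rename_i h
    rw [PySem.Dict.contains_insert]
    by_cases hk : k = x.1
    · subst hk; simp [h]
    · simp [hk]
  · rfl

theorem pvStepA_get?_of_not_contains (d : PySem.Dict String (Option (Int × Int)))
    (x : String × (Int × Int)) (k : String) (h : d.contains k = false) :
    (pvStepA d x).get? k = d.get? k := by
  unfold pvStepA
  split
  · rename_i hc
    have hne : k ≠ x.1 := by rintro rfl; rw [hc] at h; exact Bool.true_eq_false.mp h
    exact PySem.Dict.get?_insert_of_ne _ _ hne
  · rfl

theorem pvStepA_get?_of_ne (d : PySem.Dict String (Option (Int × Int)))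
    (x : String × (Int × Int)) (k : String) (h : x.1 ≠ k) :
    (pvStepA d x).get? k = d.get? k := by
  unfold pvStepA
  split
  · exact PySem.Dict.get?_insert_of_ne _ _ (Ne.symm h)
  · rfl

-- A's loop keeps the key list fixed
theorem pv_foldA_keys (cs : List (String × (Int × Int))) (d : PySem.Dict String (Option (Int × Int))) :
    (cs.foldl pvStepA d).keys = d.keys := by
  induction cs generalizing d with
  | nil => rfl
  | cons x t ih =>
    rw [List.foldl_cons, ih]
    unfold pvStepA
    split
    · rename_i h; exact PySem.Dict.keys_insert_of_contains _ _ h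
    · rfl

-- A's forward overwrite loop: the value of k is its LAST occurrence in cs (= first in cs.reverse)
theorem pv_foldA_get? (cs : List (String × (Int × Int))) (d : PySem.Dict String (Option (Int × Int)))
    (k : String) :
    (cs.foldl pvStepA d).get? k =
      match cs.reverse.find? (fun x => x.1 == k) with
      | some x => if d.contains k then some (some x.2) else d.get? k
      | none => d.get? k := by
  induction cs generalizing d with
  | nil => simp
  | cons x t ih =>
    rw [List.foldl_cons, ih, List.reverse_cons, List.find?_append]
    cases h : t.reverse.find? (fun y => y.1 == k) with
    | some y =>
      rw [pvStepA_contains]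
      by_cases hc : d.contains k = true
      · simp [hc]
      · have hc' : d.contains k = false := by revert hc; cases d.contains k <;> simp
        simp [hc', pvStepA_get?_of_not_contains d x k hc']
    | none =>
      simp only [Option.none_or]
      by_cases hk : x.1 = k
      · subst hk
        simp only [List.find?_cons, beq_self_eq_true]
        unfold pvStepA
        by_cases hc : d.contains x.1 = true
        · simp [hc, PySem.Dict.get?_insert_self]
        · have hc' : d.contains x.1 = false := by revert hc; cases d.contains x.1 <;> simp
          simp [hc']
      · have hx : (fun y : String × (Int × Int) => y.1 == k) x = false := by simp [hk]
        simp only [List.find?_cons, hx, List.find?_nil]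
        rw [pvStepA_get?_of_ne d x k hk]

-- B's loop is inert once the remaining set is empty
theorem pv_foldB_empty (cs : List (String × (Int × Int)))
    (res : PySem.Dict String (Option (Int × Int))) :
    cs.foldl pvStepB (([] : PySem.Set String), res) = ([], res) := by
  induction cs with
  | nil => rfl
  | cons x t ih =>
    have hstep : pvStepB (([] : PySem.Set String), res) x = ([], res) := rfl
    rw [List.foldl_cons, hstep, ih]

-- B's loop keeps the key list fixed as long as the remaining set only holds present keys
theorem pv_foldB_keys (cs : List (String × (Int × Int))) (rem : PySem.Set String)
    (res : PySem.Dict String (Option (Int × Int)))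
    (h : ∀ c ∈ rem, res.contains c = true) :
    ((cs.foldl pvStepB (rem, res)).2).keys = res.keys := by
  induction cs generalizing rem res with
  | nil => rfl
  | cons x t ih =>
    by_cases hmem : x.1 ∈ rem
    · have hstep : pvStepB (rem, res) x = (PySem.Set.discard rem x.1, res.insert x.1 (some x.2)) := by
        simp [pvStepB, hmem]
      have hx : res.contains x.1 = true := h x.1 hmem
      have h' : ∀ c ∈ PySem.Set.discard rem x.1, (res.insert x.1 (some x.2)).contains c = true := by
        intro c hcmem
        have hcr : c ∈ rem := ((PySem.Set.mem_discard _ _ _).mp hcmem).1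
        rw [PySem.Dict.contains_insert]
        simp [h c hcr]
      rw [List.foldl_cons, hstep, ih _ _ h', PySem.Dict.keys_insert_of_contains _ _ hx]
    · have hstep : pvStepB (rem, res) x = (rem, res) := by simp [pvStepB, hmem]
      rw [List.foldl_cons, hstep, ih _ _ h]

-- B's guarded backward loop: the value of k is its FIRST occurrence in cs
theorem pv_foldB_get? (cs : List (String × (Int × Int))) (rem : PySem.Set String)
    (res : PySem.Dict String (Option (Int × Int))) (k : String) :
    ((cs.foldl pvStepB (rem, res)).2).get? k =
      if k ∈ rem then
        match cs.find? (fun x => x.1 == k) with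
        | some x => some (some x.2)
        | none => res.get? k
      else res.get? k := by
  induction cs generalizing rem res with
  | nil => simp
  | cons x t ih =>
    by_cases hmem : x.1 ∈ rem
    · have hstep : pvStepB (rem, res) x = (PySem.Set.discard rem x.1, res.insert x.1 (some x.2)) := by
        simp [pvStepB, hmem]
      rw [List.foldl_cons, hstep, ih]
      by_cases hk : x.1 = k
      · subst hk
        have h1 : x.1 ∉ PySem.Set.discard rem x.1 := by simp [PySem.Set.mem_discard]
        simp [h1, hmem, PySem.Dict.get?_insert_self]
      · have hne : k ≠ x.1 := fun he => hk he.symm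
        have hget : (res.insert x.1 (some x.2)).get? k = res.get? k :=
          PySem.Dict.get?_insert_of_ne _ _ hne
        simp [PySem.Set.mem_discard, hne, hget, hk]
    · have hstep : pvStepB (rem, res) x = (rem, res) := by simp [pvStepB, hmem]
      rw [List.foldl_cons, hstep, ih]
      by_cases hkm : k ∈ rem
      · have hk : x.1 ≠ k := fun he => hmem (he ▸ hkm)
        simp [hkm, hk]
      · simp [hkm]

-- A's nested loops are the fold of pvStepA over the flattened cell stream
theorem pv_A_flatten (lines : List String) (d : PySem.Dict String (Option (Int × Int))) :
    (PySem.List.enumerate lines 0).foldl (fun d p =>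
      let columns := (PySem.Str.split? (PySem.Str.strip p.2) "\t").getD []
      (PySem.List.enumerate columns 0).foldl (fun d q =>
        if d.contains q.2 then d.insert q.2 (some (p.1, q.1)) else d) d) d
    = (pvCells lines).foldl pvStepA d := by
  rw [pvCells, List.foldl_flatMap]
  simp only [pvCellsOf, List.foldl_map]
  rfl

-- B's inner right-to-left loop is the fold of pvStepB over the line's reversed cells
theorem pv_inner (i : Int) (line : String)
    (st : PySem.Set String × PySem.Dict String (Option (Int × Int))) :
    ((PySem.List.enumerate ((PySem.Str.split? (PySem.Str.strip line) "\t").getD []) 0).reverse).foldl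
      (fds_step i) st
    = ((pvCellsOf (i, line)).reverse).foldl pvStepB st := by
  rw [pvCellsOf, ← List.map_reverse, List.foldl_map]
  rfl

-- B's recursion with break is the fold of pvStepB over the reversed cell stream
theorem pv_B_flatten (ls : List (Int × String))
    (st : PySem.Set String × PySem.Dict String (Option (Int × Int))) :
    fds_go ls st = ((ls.flatMap (fun p => (pvCellsOf p).reverse)).foldl pvStepB st).2 := by
  induction ls generalizing st with
  | nil => rfl
  | cons p t ih =>
    obtain ⟨i, line⟩ := p
    obtain ⟨rem, res⟩ := st
    rw [List.flatMap_cons, List.foldl_append]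
    simp only [fds_go]
    by_cases he : (rem : List String).isEmpty = true
    · have hrem : rem = [] := List.isEmpty_iff.mp he
      subst hrem
      rw [if_pos List.isEmpty_nil, pv_foldB_empty, pv_foldB_empty]
    · rw [if_neg he, pv_inner, ih]

-- the initial dict: its keys are the deduplicated keywords
theorem pv_init_keys (keywords : List String) :
    (keywords.foldl (fun d key => d.insert key none)
      (PySem.Dict.empty : PySem.Dict String (Option (Int × Int)))).keys
    = PySem.Set.ofList keywords := by
  rw [PySem.Dict.keys_foldl_insert (f := fun _ _ => none)]
  simp [PySem.Dict.keys_empty, PySem.Set.update_nil_left]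

-- ===== VERDICT (by name: the statement is the Claim_ definition above) =====
theorem find_data_starting_indices_spec : Claim_equal_find_data_starting_indices := by
  intro lines keywords _
  unfold Spec_find_data_starting_indices
  simp only [find_data_starting_indices, find_data_starting_indices_alt]
  set d0 : PySem.Dict String (Option (Int × Int)) :=
    keywords.foldl (fun d key => d.insert key none) PySem.Dict.empty
  have hkeys0 : d0.keys = PySem.Set.ofList keywords := pv_init_keys keywords
  have hnodup : (PySem.Set.ofList keywords).Nodup := PySem.Set.nodup_ofList keywords
  have hrem0 : PySem.Set.ofList d0.keys = PySem.Set.ofList keywords := by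
    rw [hkeys0]; exact PySem.Set.ofList_eq_self_of_nodup _ hnodup
  rw [pv_A_flatten lines d0]
  set dA := (pvCells lines).foldl pvStepA d0 with hdA
  rw [pv_B_flatten, hrem0]
  have hstream : ((PySem.List.enumerate lines 0).reverse.flatMap
      (fun p => (pvCellsOf p).reverse)) = (pvCells lines).reverse := by
    rw [pvCells, pv_reverse_flatMap]
  rw [hstream]
  set dB := (((pvCells lines).reverse).foldl pvStepB (PySem.Set.ofList keywords, d0)).2 with hdB
  have hkA : dA.keys = PySem.Set.ofList keywords := by rw [hdA, pv_foldA_keys, hkeys0]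
  have hkB : dB.keys = PySem.Set.ofList keywords := by
    rw [hdB, pv_foldB_keys, hkeys0]
    intro c hc
    rw [PySem.Dict.contains_iff_mem_keys, hkeys0]
    exact hc
  have hnA : dA.keys.Nodup := by rw [hkA]; exact hnodup
  have hnB : dB.keys.Nodup := by rw [hkB]; exact hnodup
  rw [PySem.Dict.items_eq_map_keys dA hnA none, PySem.Dict.items_eq_map_keys dB hnB none,
    hkA, hkB]
  apply List.map_congr_left
  intro k hk
  have hcA : d0.contains k = true := by
    rw [PySem.Dict.contains_iff_mem_keys, hkeys0]; exact hk
  have hget : dA.get? k = dB.get? k := by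
    rw [hdA, hdB, pv_foldA_get?, pv_foldB_get?, if_pos hk]
    cases h : ((pvCells lines).reverse).find? (fun x => x.1 == k) <;> simp [hcA]
  have hval : dA.getD k none = dB.getD k none := by
    rw [PySem.Dict.getD_eq_get?_getD, PySem.Dict.getD_eq_get?_getD, hget]
  rw [hval]
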